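-- pv_equiv track=rewrite | github.com/Nathan30302/TradeVerse | scripts/generate_exness_catalog.py | gen_stocks
-- ===== SOURCE A (Python) =====
-- def gen_stocks(n):
--     common = ['AAPL','MSFT','GOOGL','AMZN','TSLA','NVDA','META','INTC','CSCO','ORCL','IBM','BA','JNJ','PG','KO','PEP','DIS','ADBE','CRM','PYPL','NFLX']
--     out = []
--     i = 0
--     while len(out) < n:
--         sym = common[i % len(common)]
--         if i >= len(common):
--             sym = f'{sym}{(i//len(common))}'
--         out.append({'symbol': sym, 'name': f'{sym} Corp'})
--         i += 1
--     return out
-- ===== SOURCE B (Python) =====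
-- def gen_stocks(n):
--     common = ['AAPL','MSFT','GOOGL','AMZN','TSLA','NVDA','META','INTC','CSCO','ORCL','IBM','BA','JNJ','PG','KO','PEP','DIS','ADBE','CRM','PYPL','NFLX']
--     if n <= 0:
--         return []
--     full, rem = divmod(n, len(common))
--     rounds = full + (1 if rem else 0)
--     blocks = [
--         [{'symbol': b + suffix, 'name': b + suffix + ' Corp'} for b in common]
--         for rnd in range(rounds)
--         for suffix in ['' if rnd == 0 else str(rnd)]
--     ]
--     return [d for blk in blocks for d in blk][:n]
-- ===== Notes on version B (the rewrite author's own statement) =====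
-- stated objective: alternative
-- what changed: Instead of A's single while-loop that grows the list item by item (recomputing the symbol from a running counter with % and //, testing len(out) < n each step), B computes the needed number of rounds once with a single divmod, materialises whole overshooting rounds of dicts by comprehensions, flattens them, and truncates to n with a slice.
import Mathlib
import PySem

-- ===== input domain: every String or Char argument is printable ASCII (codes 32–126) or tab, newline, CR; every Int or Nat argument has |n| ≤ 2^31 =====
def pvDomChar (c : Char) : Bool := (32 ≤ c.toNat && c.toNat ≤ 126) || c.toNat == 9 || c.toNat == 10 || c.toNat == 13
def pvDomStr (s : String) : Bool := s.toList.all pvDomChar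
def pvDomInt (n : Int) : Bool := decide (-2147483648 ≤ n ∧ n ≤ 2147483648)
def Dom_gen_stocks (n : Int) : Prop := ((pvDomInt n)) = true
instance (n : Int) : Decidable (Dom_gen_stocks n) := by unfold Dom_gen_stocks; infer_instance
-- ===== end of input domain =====

-- B replaces A's item-by-item while loop (symbol recomputed from a running counter with % and //,
-- bound checked each step) by one divmod computing the round count, whole overshooting rounds built
-- by comprehensions, flattened, and truncated with a slice; same return value (objective: alternative).

-- ===== PORT A =====
-- the shared literal list of base symbols
def pvCommon : List String := ["AAPL","MSFT","GOOGL","AMZN","TSLA","NVDA","META","INTC","CSCO","ORCL","IBM","BA","JNJ","PG","KO","PEP","DIS","ADBE","CRM","PYPL","NFLX"]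

-- one iteration's dict: sym = common[i % 21], suffixed with i // 21 when i >= 21.
-- i is a nonnegative loop counter, so Nat % / coincide with Python's % and //,
-- and the index i % 21 is always in range (getD's default is never used).
def pvEntryA (i : Nat) : List (String × String) :=
  let sym0 := pvCommon.getD (i % pvCommon.length) ""
  let sym := if i ≥ pvCommon.length then sym0 ++ PySem.Int.toStr ((i / pvCommon.length : Nat) : Int) else sym0
  [("symbol", sym), ("name", sym ++ " Corp")]

-- the while loop: rem = number of elements still to append (= n - len(out), clamped at 0), i the counter
def pvLoopA : Nat → Nat → List (List (String × String))
  | 0, _ => []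
  | rem + 1, i => pvEntryA i :: pvLoopA rem (i + 1)

def gen_stocks (n : Int) : List (List (String × String)) := pvLoopA n.toNat 0

-- ===== PORT B =====
-- one dict of B's per-round comprehension: sym = base + suffix, suffix = '' for round 0 else str(rnd)
def pvEntryB (rnd : Nat) (base : String) : List (String × String) :=
  let sym := if rnd = 0 then base else base ++ PySem.Int.toStr ((rnd : Nat) : Int)
  [("symbol", sym), ("name", sym ++ " Corp")]

-- one whole round: the inner comprehension over common
def pvBlockB (rnd : Nat) : List (List (String × String)) := pvCommon.map (pvEntryB rnd)

-- n <= 0 early return; divmod once; rounds built over range(rounds); flatten; slice [:n]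
def gen_stocks_alt (n : Int) : List (List (String × String)) :=
  if n ≤ 0 then []
  else
    let full := n.toNat / pvCommon.length
    let rem := n.toNat % pvCommon.length
    let rounds := full + (if rem ≠ 0 then 1 else 0)
    (((List.range rounds).map pvBlockB).flatten).take n.toNat

-- ===== PRECONDITION & SPEC =====
def Spec_gen_stocks (n : Int) (out : List (List (String × String))) : Prop := out = gen_stocks_alt n
instance (n : Int) (out : List (List (String × String))) : Decidable (Spec_gen_stocks n out) := by unfold Spec_gen_stocks; infer_instance

-- ===== CLAIM (what is proved, stated in full; the proofs are below) =====
def Claim_equal_gen_stocks : Prop := ∀ (n : Int), Dom_gen_stocks n → Spec_gen_stocks n (gen_stocks n)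

-- ===== LEMMAS AND PROOFS =====

-- A's entry at i = 21*r + j (j < 21) is base common[j], suffixed with r when r ≥ 1
theorem pvEntryA_eq (r j : Nat) (hj : j < 21) :
    pvEntryA (21 * r + j) = pvEntryB r (pvCommon.getD j "") := by
  have hlen : pvCommon.length = 21 := by decide
  have hmod : (21 * r + j) % 21 = j := by omega
  have hdiv : (21 * r + j) / 21 = r := by omega
  unfold pvEntryA pvEntryB
  rw [hlen, hmod, hdiv]
  rcases Nat.eq_zero_or_pos r with hr | hr
  · subst hr; simp; omega
  · have : 21 * r + j ≥ 21 := by omega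
    simp [this, Nat.pos_iff_ne_zero.mp hr]

theorem pvLoopA_append (a b i : Nat) :
    pvLoopA (a + b) i = pvLoopA a i ++ pvLoopA b (i + a) := by
  induction a generalizing i with
  | zero => simp [pvLoopA]
  | succ a ih =>
      have : a + 1 + b = (a + b) + 1 := by omega
      rw [this]
      simp [pvLoopA, ih (i + 1)]
      ring_nf

-- mapping B's entry over a suffix of pvCommon equals A's loop at the aligned counter
theorem pvMapB_eq (r : Nat) (l : List String) :
    ∀ (j : Nat), l.length + j = 21 →
      (∀ k, k < l.length → l.getD k "" = pvCommon.getD (j + k) "") →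
      l.map (pvEntryB r) = pvLoopA l.length (21 * r + j) := by
  induction l with
  | nil => intro j _ _; simp [pvLoopA]
  | cons b rest ih =>
      intro j hlen hget
      have hj : j < 21 := by simp at hlen; omega
      have hb : b = pvCommon.getD j "" := by
        have := hget 0 (by simp); simpa using this
      simp only [List.map_cons, List.length_cons, pvLoopA]
      congr 1
      · rw [pvEntryA_eq r j hj, hb]
      · have h1 : rest.length + (j + 1) = 21 := by simp at hlen; omega
        have h2 : ∀ k, k < rest.length → rest.getD k "" = pvCommon.getD (j + 1 + k) "" := by
          intro k hk
          have := hget (k + 1) (by simp; omega)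
          simpa [Nat.add_comm, Nat.add_assoc, Nat.add_left_comm] using this
        have := ih (j + 1) h1 h2
        rw [this]
        ring_nf

-- one whole round of B is 21 consecutive steps of A's loop
theorem pvBlockB_eq (r : Nat) : pvBlockB r = pvLoopA 21 (21 * r) := by
  have := pvMapB_eq r pvCommon 0 (by decide) (by intro k hk; simp)
  simpa [pvBlockB] using this

-- R flattened rounds are the first 21*R steps of A's loop
theorem pvFlatten_eq (R : Nat) :
    ((List.range R).map pvBlockB).flatten = pvLoopA (21 * R) 0 := by
  induction R with
  | zero => simp [pvLoopA]
  | succ R ih =>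
      rw [List.range_succ, List.map_append, List.flatten_append]
      simp only [List.map_cons, List.map_nil, List.flatten_cons, List.flatten_nil, List.append_nil]
      rw [ih, pvBlockB_eq]
      have := pvLoopA_append (21 * R) 21 0
      rw [show 21 * (R + 1) = 21 * R + 21 from by ring, this]
      simp

theorem pvLoopA_take (k : Nat) : ∀ m i, (pvLoopA m i).take k = pvLoopA (min k m) i := by
  induction k with
  | zero => intro m i; simp [pvLoopA]
  | succ k ih =>
      intro m i
      cases m with
      | zero => simp [pvLoopA]
      | succ m =>
          simp only [pvLoopA, List.take_succ_cons, ih]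
          have : min (k + 1) (m + 1) = min k m + 1 := by omega
          rw [this]
          rfl

-- ===== VERDICT (by name: the statement is the Claim_ definition above) =====
theorem gen_stocks_spec : Claim_equal_gen_stocks := by
  intro n _
  show gen_stocks n = gen_stocks_alt n
  unfold gen_stocks gen_stocks_alt
  split
  · rename_i h
    have : n.toNat = 0 := by omega
    simp [this, pvLoopA]
  · rename_i h
    have hlen : pvCommon.length = 21 := by decide
    simp only [hlen]
    rw [pvFlatten_eq, pvLoopA_take]
    have hpos : 0 < n.toNat := by omega
    have hle : n.toNat ≤ 21 * (n.toNat / 21 + if n.toNat % 21 ≠ 0 then 1 else 0) := by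
      rcases Nat.eq_zero_or_pos (n.toNat % 21) with h0 | h0
      · simp [h0]; omega
      · have : (n.toNat % 21 ≠ 0) := by omega
        simp [this]; omega
    rw [min_eq_left hle]
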